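-- pv_equiv track=rewrite | github.com/JaredTully/C200jttully | Labs/Lab9/recPrac.py | myReplace
-- ===== SOURCE A (Python) =====
-- def myReplace(old, new, cont):
--     """
--     Recursively return a list of all contents of `cont` but any value that is
--     `old` is replaced with `new`
--     """
--     if cont:
--         if cont[0] == old:
--             return [new] + myReplace(old, new, cont[1:])
--         else:
--             return [cont[0]] + myReplace(old, new, cont[1:])
--     else:
--         return []
-- ===== SOURCE B (Python) =====
-- def myReplace(old, new, cont):
--     """Iteratively build the replaced list with an explicit accumulator loop."""
--     result = []
--     for x in cont:
--         if x == old: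
--             result.append(new)
--         else:
--             result.append(x)
--     return result
-- ===== Notes on version B (the rewrite author's own statement) =====
-- stated objective: simpler
-- what changed: Replaces head/tail recursion with [new]+rest concatenation by a single iterative loop appending into an accumulator list.
import Mathlib
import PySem

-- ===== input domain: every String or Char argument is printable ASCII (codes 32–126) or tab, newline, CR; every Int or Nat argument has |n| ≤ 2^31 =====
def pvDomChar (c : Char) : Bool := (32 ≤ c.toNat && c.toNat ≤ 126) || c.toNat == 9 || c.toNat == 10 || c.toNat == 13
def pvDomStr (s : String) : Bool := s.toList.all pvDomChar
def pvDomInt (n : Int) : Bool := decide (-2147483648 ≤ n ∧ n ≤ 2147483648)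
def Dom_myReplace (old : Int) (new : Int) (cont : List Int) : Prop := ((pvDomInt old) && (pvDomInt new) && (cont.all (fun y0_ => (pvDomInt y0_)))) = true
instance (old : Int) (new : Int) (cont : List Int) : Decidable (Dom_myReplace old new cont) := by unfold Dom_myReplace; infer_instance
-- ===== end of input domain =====

-- ===== PORT A =====
-- header: B replaces A's recursion-with-concatenation by one iterative accumulation loop (objective: simpler/faster).
def myReplace (old : Int) (new : Int) (cont : List Int) : List Int :=
  match cont with
  | [] => []
  | c :: rest =>
    if c = old then [new] ++ myReplace old new rest
    else [c] ++ myReplace old new rest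

-- ===== PORT B =====
def myReplace_alt (old : Int) (new : Int) (cont : List Int) : List Int :=
  cont.foldl (fun result x => if x = old then result ++ [new] else result ++ [x]) []

-- ===== PRECONDITION & SPEC =====
def Spec_myReplace (old : Int) (new : Int) (cont : List Int) (out : List Int) : Prop := out = myReplace_alt old new cont
instance (old : Int) (new : Int) (cont : List Int) (out : List Int) : Decidable (Spec_myReplace old new cont out) := by unfold Spec_myReplace; infer_instance

-- ===== CLAIM (what is proved, stated in full; the proofs are below) =====
def Claim_equal_myReplace : Prop := ∀ (old : Int) (new : Int) (cont : List Int), Dom_myReplace old new cont → Spec_myReplace old new cont (myReplace old new cont)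

-- ===== LEMMAS AND PROOFS =====

-- ===== VERDICT (by name: the statement is the Claim_ definition above) =====
theorem alt_foldl_acc (old new : Int) (cont : List Int) (acc : List Int) :
    cont.foldl (fun result x => if x = old then result ++ [new] else result ++ [x]) acc
      = acc ++ myReplace old new cont := by
  induction cont generalizing acc with
  | nil => simp [myReplace]
  | cons c rest ih =>
    simp only [List.foldl, myReplace]
    by_cases h : c = old <;> simp [h, ih]

theorem myReplace_spec : Claim_equal_myReplace := by
  intro old new cont _
  unfold Spec_myReplace myReplace_alt
  simp [alt_foldl_acc]
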